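-- pv_equiv track=rewrite | github.com/rajathpatel23/joint-kge-fnet-lm | KGE_LM/preprocess/kge_data_collection.py | get_rel_dict
-- ===== SOURCE A (Python) =====
-- from collections import defaultdict, Counter
--
-- def get_rel_dict(head_list, tail_list, rel_list):
--     """
--     :param head_list: entity list with head, tail, relations
--     :param tail_list: tail list
--     :param rel_list : relations list
--     :return: dictionary of relations mapped to entities
--     """
--     rel_head = defaultdict(list)
--     rel_tail = defaultdict(list)
--     for index, entity in enumerate(rel_list):
--         if head_list[index] not in rel_head[entity]:
--             rel_head[entity].append(head_list[index])
--         if tail_list[index] not in rel_tail[entity]: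
--             rel_tail[entity].append(tail_list[index])
--     return rel_head, rel_tail
-- ===== SOURCE B (Python) =====
-- from collections import defaultdict
--
-- def get_rel_dict(head_list, tail_list, rel_list):
--     rel_head = defaultdict(list)
--     rel_tail = defaultdict(list)
--     # key-outer decomposition: for each distinct relation (first-occurrence order),
--     # gather its heads/tails by scanning the triples, deduping in order via dict.fromkeys
--     for entity in dict.fromkeys(rel_list):
--         rel_head[entity] = list(dict.fromkeys(
--             head_list[i] for i, r in enumerate(rel_list) if r == entity))
--         rel_tail[entity] = list(dict.fromkeys(
--             tail_list[i] for i, r in enumerate(rel_list) if r == entity))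
--     return rel_head, rel_tail
-- ===== Notes on version B (the rewrite author's own statement) =====
-- stated objective: alternative
-- what changed: B inverts the traversal: instead of A's single incremental pass with an inline membership scan before each append, B loops over the distinct relations (first-occurrence order) and for each one gathers its heads/tails by scanning the triples and ordered-deduping with dict.fromkeys.
import Mathlib
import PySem

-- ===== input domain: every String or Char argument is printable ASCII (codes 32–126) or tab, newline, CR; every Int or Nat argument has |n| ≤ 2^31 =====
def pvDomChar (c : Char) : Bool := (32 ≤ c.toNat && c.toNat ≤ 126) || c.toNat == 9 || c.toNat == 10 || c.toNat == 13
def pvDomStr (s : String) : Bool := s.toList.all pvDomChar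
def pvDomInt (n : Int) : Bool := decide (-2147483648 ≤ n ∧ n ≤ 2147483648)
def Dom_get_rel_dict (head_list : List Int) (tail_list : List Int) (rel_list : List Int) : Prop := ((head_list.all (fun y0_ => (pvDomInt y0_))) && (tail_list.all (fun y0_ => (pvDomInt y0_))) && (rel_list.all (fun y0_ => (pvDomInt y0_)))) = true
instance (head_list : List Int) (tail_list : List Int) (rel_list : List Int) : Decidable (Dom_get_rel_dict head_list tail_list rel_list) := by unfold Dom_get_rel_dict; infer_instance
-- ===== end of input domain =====

-- B inverts the traversal: a loop over the distinct relations gathering each group by rescanning the triples with ordered dedup, instead of A's single incremental pass with an inline membership scan; alternative decomposition, not claimed faster. Python A/B mutate only locally-created dicts, no caller-visible side effects.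


-- ===== PORT A =====
-- A's loop body for ONE dict: look up xs[index] (IndexError = none, excluded by Pre_),
-- touch the defaultdict entry, append only if not already present.
def pvStepA (xs : List Int) (d : PySem.Dict Int (List Int)) (ie : Int × Int) : PySem.Dict Int (List Int) :=
  match PySem.List.pyGet? xs ie.1 with
  | some v =>
      let cur := d.getD ie.2 []
      if v ∈ cur then d.insert ie.2 cur else d.insert ie.2 (cur ++ [v])
  | none => d

def get_rel_dict (head_list : List Int) (tail_list : List Int) (rel_list : List Int) : (List (Int × List Int)) × (List (Int × List Int)) :=
  let st := (PySem.List.enumerate rel_list 0).foldl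
    (fun (st : PySem.Dict Int (List Int) × PySem.Dict Int (List Int)) ie =>
      (pvStepA head_list st.1 ie, pvStepA tail_list st.2 ie))
    (PySem.Dict.empty, PySem.Dict.empty)
  (st.1.items, st.2.items)

-- ===== PORT B =====
-- B's group for one relation: 'list(dict.fromkeys(xs[i] for i, r in enumerate(rel) if r == entity))'.
-- The generator indexes xs[i]; an out-of-range i (IndexError, excluded by Pre_) is the filterMap's none.
def pvGroup (xs : List Int) (rel : List Int) (entity : Int) : List Int :=
  PySem.List.dedup
    (((PySem.List.enumerate rel 0).filter (fun p => p.2 == entity)).filterMap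
      (fun p => PySem.List.pyGet? xs p.1))

-- B's loop: 'for entity in dict.fromkeys(rel_list)', assigning both groups per key.
def get_rel_dict_alt (head_list : List Int) (tail_list : List Int) (rel_list : List Int) : (List (Int × List Int)) × (List (Int × List Int)) :=
  let st := (PySem.List.dedup rel_list).foldl
    (fun (st : PySem.Dict Int (List Int) × PySem.Dict Int (List Int)) entity =>
      (st.1.insert entity (pvGroup head_list rel_list entity),
       st.2.insert entity (pvGroup tail_list rel_list entity)))
    (PySem.Dict.empty, PySem.Dict.empty)
  (st.1.items, st.2.items)

-- ===== PRECONDITION & SPEC =====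
-- Pre_ excludes exactly the inputs where Python A raises IndexError: rel_list longer than head_list or tail_list.
def Pre_get_rel_dict (head_list : List Int) (tail_list : List Int) (rel_list : List Int) : Prop :=
  rel_list.length ≤ head_list.length ∧ rel_list.length ≤ tail_list.length
instance (head_list : List Int) (tail_list : List Int) (rel_list : List Int) : Decidable (Pre_get_rel_dict head_list tail_list rel_list) := by unfold Pre_get_rel_dict; infer_instance
def pvWitness_get_rel_dict : List Int × List Int × List Int := ([1, 2, 1], [3, 3, 4], [5, 5, 5])

def Spec_get_rel_dict (head_list : List Int) (tail_list : List Int) (rel_list : List Int) (out : (List (Int × List Int)) × (List (Int × List Int))) : Prop := out = get_rel_dict_alt head_list tail_list rel_list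
instance (head_list : List Int) (tail_list : List Int) (rel_list : List Int) (out : (List (Int × List Int)) × (List (Int × List Int))) : Decidable (Spec_get_rel_dict head_list tail_list rel_list out) := by unfold Spec_get_rel_dict; infer_instance

-- ===== CLAIM (what is proved, stated in full; the proofs are below) =====
def Claim_equal_get_rel_dict : Prop := ∀ (head_list : List Int) (tail_list : List Int) (rel_list : List Int), Dom_get_rel_dict head_list tail_list rel_list → Pre_get_rel_dict head_list tail_list rel_list → Spec_get_rel_dict head_list tail_list rel_list (get_rel_dict head_list tail_list rel_list)

-- ===== LEMMAS AND PROOFS =====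

-- a paired fold splits into two independent folds
theorem pvFold_pair {α β γ : Type} (f : β → α → β) (g : γ → α → γ) (l : List α) (b : β) (c : γ) :
    l.foldl (fun (st : β × γ) x => (f st.1 x, g st.2 x)) (b, c) = (l.foldl f b, l.foldl g c) := by
  induction l generalizing b c with
  | nil => rfl
  | cons x rest ih => simpa using ih (f b x) (g c x)

-- A's per-dict fold: the value at key e is the ordered set-update of the old value by
-- the in-range xs-values whose relation equals e
theorem pvA_getD (xs : List Int) (l : List (Int × Int)) (d : PySem.Dict Int (List Int)) (e : Int) :
    (l.foldl (pvStepA xs) d).getD e []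
      = PySem.Set.update (d.getD e [])
          ((l.filter (fun p => p.2 == e)).filterMap (fun p => PySem.List.pyGet? xs p.1)) := by
  induction l generalizing d with
  | nil => rfl
  | cons ie rest ih =>
    rw [List.foldl_cons, ih]
    by_cases he : ie.2 = e
    · subst he
      cases hg : PySem.List.pyGet? xs ie.1 with
      | none =>
        simp [pvStepA, hg]
      | some v =>
        have hstep : (pvStepA xs d ie).getD ie.2 [] = PySem.Set.add (d.getD ie.2 []) v := by
          rw [PySem.Set.add_eq_ite]
          by_cases hm : v ∈ d.getD ie.2 [] <;>
            simp [pvStepA, hg, hm, PySem.Dict.getD_insert]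
        rw [hstep]
        simp [hg, PySem.Set.update]
    · have hstep : (pvStepA xs d ie).getD e [] = d.getD e [] := by
        unfold pvStepA
        cases hg : PySem.List.pyGet? xs ie.1 with
        | none => rfl
        | some v =>
          by_cases hm : v ∈ d.getD ie.2 [] <;>
            simp [hm, PySem.Dict.getD_insert, show ¬ e = ie.2 from fun h => he h.symm]
      rw [hstep]
      simp [show (ie.2 == e) = false by simpa using he]

-- A's per-dict fold: when every index is in range, the keys are the set-update by the relations
theorem pvA_keys (xs : List Int) (l : List (Int × Int)) (d : PySem.Dict Int (List Int))
    (hin : ∀ p ∈ l, (PySem.List.pyGet? xs p.1).isSome) :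
    (l.foldl (pvStepA xs) d).keys = PySem.Set.update d.keys (l.map (·.2)) := by
  induction l generalizing d with
  | nil => rfl
  | cons ie rest ih =>
    obtain ⟨v, hv⟩ := Option.isSome_iff_exists.mp (hin ie (List.mem_cons_self))
    have hk : ∀ w, (d.insert ie.2 w).keys = PySem.Set.add d.keys ie.2 := by
      intro w
      rw [PySem.Set.add_eq_ite]
      by_cases hc : d.contains ie.2 = true
      · rw [PySem.Dict.keys_insert_of_contains _ _ hc,
          if_pos ((PySem.Dict.contains_iff_mem_keys _ _).mp hc)]
      · have hc' : d.contains ie.2 = false := by simpa using hc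
        rw [PySem.Dict.keys_insert_of_not_contains _ _ hc',
          if_neg (fun h => by simp [(PySem.Dict.contains_iff_mem_keys _ _).mpr h] at hc')]
    have hstep : (pvStepA xs d ie).keys = PySem.Set.add d.keys ie.2 := by
      unfold pvStepA
      rw [hv]
      by_cases hm : v ∈ d.getD ie.2 [] <;> simp [hm, hk]
    rw [List.foldl_cons, ih _ (fun p hp => hin p (List.mem_cons_of_mem _ hp)), hstep]
    simp [PySem.Set.update]

-- A's per-dict fold keeps keys Nodup
theorem pvA_nodup (xs : List Int) (l : List (Int × Int)) (d : PySem.Dict Int (List Int))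
    (hd : d.keys.Nodup) : (l.foldl (pvStepA xs) d).keys.Nodup := by
  induction l generalizing d with
  | nil => exact hd
  | cons ie rest ih =>
    rw [List.foldl_cons]
    apply ih
    unfold pvStepA
    cases PySem.List.pyGet? xs ie.1 with
    | none => exact hd
    | some v =>
      by_cases hm : v ∈ d.getD ie.2 [] <;> simp [hm, PySem.Dict.nodup_keys_insert _ _ _ hd]

-- under Pre_, every index produced by enumerate is in range for xs
theorem pvInRange (xs rel : List Int) (hlen : rel.length ≤ xs.length) :
    ∀ p ∈ PySem.List.enumerate rel 0, (PySem.List.pyGet? xs p.1).isSome := by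
  intro p hp
  obtain ⟨k, hk, hpk⟩ := (PySem.List.mem_enumerate_iff _ _ _).mp hp
  subst hpk
  have hkx : k < xs.length := lt_of_lt_of_le hk hlen
  simp [PySem.List.pyGet?_natCast, List.getElem?_eq_getElem hkx]

-- B's paired fold over the distinct relations splits into two independent folds
theorem pvFold_pairB (h t rel l : List Int) (dh dt : PySem.Dict Int (List Int)) :
    l.foldl (fun (st : PySem.Dict Int (List Int) × PySem.Dict Int (List Int)) entity =>
        (st.1.insert entity (pvGroup h rel entity), st.2.insert entity (pvGroup t rel entity)))
      (dh, dt)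
    = (l.foldl (fun d e => d.insert e (pvGroup h rel e)) dh,
       l.foldl (fun d e => d.insert e (pvGroup t rel e)) dt) := by
  induction l generalizing dh dt with
  | nil => rfl
  | cons x rest ih => simpa using ih _ _

-- the two sides produce the same items list for ONE dict
theorem pvSide (xs rel : List Int) (hlen : rel.length ≤ xs.length) :
    ((PySem.List.enumerate rel 0).foldl (pvStepA xs) PySem.Dict.empty).items
      = ((PySem.List.dedup rel).foldl
          (fun (d : PySem.Dict Int (List Int)) e => d.insert e (pvGroup xs rel e))
          PySem.Dict.empty).items := by
  have hkeys : ((PySem.List.enumerate rel 0).foldl (pvStepA xs) PySem.Dict.empty).keys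
      = PySem.List.dedup rel := by
    rw [pvA_keys xs _ _ (pvInRange xs rel hlen), PySem.List.map_snd_enumerate]
    simp [PySem.Set.update, PySem.Dict.keys_empty, PySem.Set.ofList_eq_foldl,
      PySem.List.dedup_eq_ofList]
  rw [PySem.Dict.items_eq_map_keys _ (pvA_nodup xs _ _ (by simp [PySem.Dict.keys_empty])) []]
  refine Eq.trans ?_ (PySem.Dict.items_foldl_insert_fresh (PySem.List.dedup rel)
      (fun e => e) (fun e => pvGroup xs rel e) PySem.Dict.empty
      (by intro a _; simp [PySem.Dict.contains_empty])
      (by simpa using PySem.List.nodup_dedup rel)).symm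
  rw [hkeys]
  simp only [show (PySem.Dict.empty : PySem.Dict Int (List Int)).items = [] from rfl, List.nil_append]
  apply List.map_congr_left
  intro e _
  rw [pvA_getD]
  simp [pvGroup, PySem.Set.update, PySem.List.dedup_eq_ofList, PySem.Set.ofList_eq_foldl,
    PySem.Dict.getD_empty]

-- ===== VERDICT (by name: the statement is the Claim_ definition above) =====
theorem get_rel_dict_spec : Claim_equal_get_rel_dict := by
  intro head_list tail_list rel_list _ hpre
  unfold Spec_get_rel_dict get_rel_dict get_rel_dict_alt
  simp only [pvFold_pair, pvFold_pairB]
  exact Prod.ext (pvSide head_list rel_list hpre.1) (pvSide tail_list rel_list hpre.2)
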